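-- pv_equiv track=rewrite | github.com/Black-Hawk-005/Advent-of-Code-2024---Python | day4/part1.py | diagonal_to_horizontal_top_right
-- ===== SOURCE A (Python) =====
-- def diagonal_to_horizontal_top_right(input_lines):
--     """
--     Converts diagonals starting from the top-right of the matrix into horizontal lines.
--
--     Args:
--         input_lines (list of str): List of input lines (matrix).
--
--     Returns:
--         list of str: List of horizontal lines formed from the diagonals starting from top-right.
--     """
--     num_rows = len(input_lines)
--     num_columns = len(input_lines[0].strip())
--     horizontal = ['' for _ in range(num_rows + num_columns - 1)]  # Diagonal lines
--
--     for i in range(num_rows):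
--         for j in range(num_columns):
--             if input_lines[i][j] != '\n':
--                 horizontal[(num_columns - 1) + (i - j)] += input_lines[i][j]
--
--     return horizontal
-- ===== SOURCE B (Python) =====
-- def diagonal_to_horizontal_top_right(input_lines):
--     """Per-diagonal walk: for each diagonal index d (i - j = d - (num_columns - 1)
--     fixed), start at the diagonal's first in-bounds cell and step down-right,
--     collecting characters (skipping '\n' like the original)."""
--     num_rows = len(input_lines)
--     num_columns = len(input_lines[0].strip())
--     horizontal = []
--     for d in range(num_rows + num_columns - 1):
--         k = d - (num_columns - 1)
--         i, j = (k, 0) if k >= 0 else (0, -k)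
--         chars = []
--         while i < num_rows and j < num_columns:
--             c = input_lines[i][j]
--             if c != '\n':
--                 chars.append(c)
--             i += 1
--             j += 1
--         horizontal.append(''.join(chars))
--     return horizontal
-- ===== Notes on version B (the rewrite author's own statement) =====
-- stated objective: alternative
-- what changed: Instead of a row-major double loop that appends into a pre-sized list indexed by (num_columns-1)+(i-j), B iterates over diagonal indices d, computes the diagonal's starting cell and walks it down-right, joining the collected characters and appending each finished diagonal in order.
import Mathlib
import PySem

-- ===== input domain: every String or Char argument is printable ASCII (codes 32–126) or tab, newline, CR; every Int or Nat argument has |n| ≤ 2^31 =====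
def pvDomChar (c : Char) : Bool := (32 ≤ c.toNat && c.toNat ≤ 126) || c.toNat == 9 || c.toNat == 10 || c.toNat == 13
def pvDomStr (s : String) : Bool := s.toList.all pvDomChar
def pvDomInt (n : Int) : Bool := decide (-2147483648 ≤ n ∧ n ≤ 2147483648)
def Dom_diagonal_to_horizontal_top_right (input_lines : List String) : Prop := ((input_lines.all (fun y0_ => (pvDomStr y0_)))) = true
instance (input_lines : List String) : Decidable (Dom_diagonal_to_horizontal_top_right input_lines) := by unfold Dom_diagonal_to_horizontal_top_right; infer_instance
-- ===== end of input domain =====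

-- B rebuilds each output string by walking its diagonal cell by cell, instead of A's
-- row-major scan appending into a pre-sized list; same cost, different decomposition.

-- ===== PORT A =====
-- inner loop body: 'if input_lines[i][j] != '\n': horizontal[d] += input_lines[i][j]'
-- (indexing ported as getD over Nat indices, exact in range; out-of-range raises in
--  Python and is excluded by Pre_)
def pvA_cellStep (g : List String) (C i : Nat) (h : List String) (j : Nat) : List String :=
  let c := ((g.getD i "").toList.getD j ' ')
  if c ≠ '\n' then
    let d := C - 1 + i - j
    h.set d (h.getD d "" ++ String.ofList [c])
  else h

-- 'for j in range(num_columns): …'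
def pvA_rowStep (g : List String) (C : Nat) (h : List String) (i : Nat) : List String :=
  (List.range C).foldl (pvA_cellStep g C i) h

def diagonal_to_horizontal_top_right (input_lines : List String) : List String :=
  let num_rows := input_lines.length
  let num_columns := (PySem.Str.strip (input_lines.headD "")).length
  let horizontal := List.replicate (num_rows + num_columns - 1) ""
  (List.range num_rows).foldl (pvA_rowStep input_lines num_columns) horizontal

-- ===== PORT B =====
-- 'while i < num_rows and j < num_columns: …' walk down one diagonal
def pvWalk (g : List String) (R C i j : Nat) : List Char :=
  if _h : i < R ∧ j < C then
    let c := ((g.getD i "").toList.getD j ' ')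
    (if c ≠ '\n' then [c] else []) ++ pvWalk g R C (i + 1) (j + 1)
  else []
termination_by R - i

def diagonal_to_horizontal_top_right_alt (input_lines : List String) : List String :=
  let num_rows := input_lines.length
  let num_columns := (PySem.Str.strip (input_lines.headD "")).length
  (List.range (num_rows + num_columns - 1)).map (fun (d : Nat) =>
    let k : Int := (d : Int) - ((num_columns : Int) - 1)
    let ij : Nat × Nat := if 0 ≤ k then (k.toNat, 0) else (0, (-k).toNat)
    String.ofList (pvWalk input_lines num_rows num_columns ij.1 ij.2))

-- ===== PRECONDITION & SPEC =====
-- Pre_ excludes exactly the inputs where Python A raises IndexError: the empty list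
-- (input_lines[0]) and rows shorter than num_columns (input_lines[i][j]).
def Pre_diagonal_to_horizontal_top_right (input_lines : List String) : Prop :=
  input_lines ≠ [] ∧
  ∀ s ∈ input_lines, (PySem.Str.strip (input_lines.headD "")).length ≤ s.toList.length
instance (input_lines : List String) : Decidable (Pre_diagonal_to_horizontal_top_right input_lines) := by
  unfold Pre_diagonal_to_horizontal_top_right; infer_instance

def pvWitness_diagonal_to_horizontal_top_right : List String := ["ab", "cd"]

def Spec_diagonal_to_horizontal_top_right (input_lines : List String) (out : List String) : Prop := out = diagonal_to_horizontal_top_right_alt input_lines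
instance (input_lines : List String) (out : List String) : Decidable (Spec_diagonal_to_horizontal_top_right input_lines out) := by unfold Spec_diagonal_to_horizontal_top_right; infer_instance

-- ===== CLAIM (what is proved, stated in full; the proofs are below) =====
def Claim_equal_diagonal_to_horizontal_top_right : Prop := ∀ (input_lines : List String), Dom_diagonal_to_horizontal_top_right input_lines → Pre_diagonal_to_horizontal_top_right input_lines → Spec_diagonal_to_horizontal_top_right input_lines (diagonal_to_horizontal_top_right input_lines)

-- ===== LEMMAS AND PROOFS =====

-- the contribution of cell (i,j): its character unless it is '\n'
def pvCell (g : List String) (i j : Nat) : List Char :=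
  let c := ((g.getD i "").toList.getD j ' ')
  if c ≠ '\n' then [c] else []

theorem pvA_cellStep_length (g : List String) (C i : Nat) (h : List String) (j : Nat) :
    (pvA_cellStep g C i h j).length = h.length := by
  unfold pvA_cellStep; dsimp only; split <;> simp

theorem pvA_rowStep_length (g : List String) (C : Nat) (h : List String) (i : Nat) :
    (pvA_rowStep g C h i).length = h.length := by
  unfold pvA_rowStep
  induction List.range C generalizing h with
  | nil => rfl
  | cons a l ih => simp [List.foldl_cons, ih, pvA_cellStep_length]

theorem pvA_cellFold_length (g : List String) (C i : Nat) (l : List Nat) (h : List String) :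
    (l.foldl (pvA_cellStep g C i) h).length = h.length := by
  induction l generalizing h with
  | nil => rfl
  | cons a l ih => simp [List.foldl_cons, ih, pvA_cellStep_length]

theorem pvA_rowFold_length (g : List String) (C : Nat) (l : List Nat) (h : List String) :
    (l.foldl (pvA_rowStep g C) h).length = h.length := by
  induction l generalizing h with
  | nil => rfl
  | cons a l ih => simp [List.foldl_cons, ih, pvA_rowStep_length]

theorem pvA_length (g : List String) :
    (diagonal_to_horizontal_top_right g).length
      = g.length + (PySem.Str.strip (g.headD "")).length - 1 := by
  unfold diagonal_to_horizontal_top_right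
  rw [pvA_rowFold_length]; simp

theorem pvGetD_set (l : List String) (i j : Nat) (v : String) :
    (l.set i v).getD j "" = if j = i ∧ i < l.length then v else l.getD j "" := by
  simp [List.getD_eq_getElem?_getD, List.getElem?_set]
  split_ifs <;> simp_all

theorem pvA_cellStep_getD (g : List String) (C i : Nat) (h : List String) (j e : Nat)
    (hj : C - 1 + i - j < h.length) :
    (pvA_cellStep g C i h j).getD e "" =
      if e = C - 1 + i - j then h.getD e "" ++ String.ofList (pvCell g i j)
      else h.getD e "" := by
  unfold pvA_cellStep pvCell
  dsimp only
  split
  case isTrue hc =>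
    rw [pvGetD_set]
    by_cases he : e = C - 1 + i - j
    · rw [if_pos ⟨he, hj⟩, if_pos he, he]
    · rw [if_neg (fun hh => he hh.1), if_neg he]
  case isFalse hc =>
    have hc' : ((g.getD i "").toList.getD j ' ') = '\n' := by
      by_contra hne; exact hc hne
    by_cases he : e = C - 1 + i - j
    · rw [if_pos he, String.ofList_nil, String.append_empty]
    · rw [if_neg he]

theorem pvA_rowStep_aux (g : List String) (C i : Nat) (h : List String) (e : Nat)
    (hlen : C + i ≤ h.length) :
    ∀ n, n ≤ C →
    ((List.range n).foldl (pvA_cellStep g C i) h).getD e "" =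
      h.getD e "" ++ String.ofList
        (if e ≤ C - 1 + i ∧ C - 1 + i - e < C ∧ C - 1 + i - e < n
         then pvCell g i (C - 1 + i - e) else []) := by
  intro n
  induction n with
  | zero => intro _; simp
  | succ n ih =>
    intro hn
    rw [List.range_succ, List.foldl_append, List.foldl_cons, List.foldl_nil]
    rw [pvA_cellStep_getD g C i _ n e (by rw [pvA_cellFold_length]; omega)]
    rw [ih (by omega)]
    by_cases he : e = C - 1 + i - n
    · have h1 : ¬ (e ≤ C - 1 + i ∧ C - 1 + i - e < C ∧ C - 1 + i - e < n) := by omega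
      have h2 : e ≤ C - 1 + i ∧ C - 1 + i - e < C ∧ C - 1 + i - e < n + 1 := by omega
      have h3 : C - 1 + i - e = n := by omega
      rw [if_pos he, if_neg h1, if_pos h2, h3, String.ofList_nil, String.append_empty]
    · have h4 : (e ≤ C - 1 + i ∧ C - 1 + i - e < C ∧ C - 1 + i - e < n) ↔
          (e ≤ C - 1 + i ∧ C - 1 + i - e < C ∧ C - 1 + i - e < n + 1) := by
        constructor <;> intro hh <;> [omega; (exact ⟨hh.1, hh.2.1, by omega⟩)]
      simp only [if_neg he, h4]

theorem pvA_rowStep_getD (g : List String) (C : Nat) (h : List String) (i e : Nat)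
    (hlen : C + i ≤ h.length) :
    (pvA_rowStep g C h i).getD e "" =
      h.getD e "" ++ String.ofList
        (if e ≤ C - 1 + i ∧ C - 1 + i - e < C then pvCell g i (C - 1 + i - e) else []) := by
  unfold pvA_rowStep
  rw [pvA_rowStep_aux g C i h e hlen C le_rfl]
  congr 2
  apply if_congr _ rfl rfl
  constructor
  · rintro ⟨a, b, _⟩; exact ⟨a, b⟩
  · rintro ⟨a, b⟩; exact ⟨a, b, b⟩

theorem pvWalk_eq (g : List String) (R C : Nat) :
    ∀ n i j, R - i = n →
    pvWalk g R C i j =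
      (List.range (R - i)).flatMap
        (fun t => if j + t < C then pvCell g (i + t) (j + t) else []) := by
  intro n
  induction n with
  | zero =>
    intro i j hn
    rw [pvWalk, hn]
    have : ¬ (i < R ∧ j < C) := by omega
    simp [this]
  | succ n ih =>
    intro i j hn
    rw [pvWalk]
    by_cases hi : i < R ∧ j < C
    · rw [dif_pos hi, ih (i + 1) (j + 1) (by omega), hn]
      rw [List.range_succ_eq_map]
      simp only [List.flatMap_cons, List.flatMap_map]
      have h0 : j + 0 < C := by omega
      rw [if_pos h0]
      have hR1 : R - (i + 1) = n := by omega
      rw [hR1]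
      have e1 : ∀ t, j + (t + 1) = j + 1 + t := fun t => by omega
      have e2 : ∀ t, i + (t + 1) = i + 1 + t := fun t => by omega
      have hfun : (fun t => if j + 1 + t < C then pvCell g (i + 1 + t) (j + 1 + t) else [])
          = (fun t => if j + (t + 1) < C then pvCell g (i + (t + 1)) (j + (t + 1)) else []) := by
        funext t; rw [e1 t, e2 t]
      rw [hfun]
      simp only [Nat.succ_eq_add_one, Nat.add_zero]
      rfl
    · rw [dif_neg hi]
      symm
      rw [List.flatMap_eq_nil_iff]
      intro t ht
      have htl := List.mem_range.mp ht
      rw [if_neg (by omega)]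

theorem pvA_getD_aux (g : List String) (C R e : Nat) (hR : R = g.length) :
    ∀ n, n ≤ R →
    ((List.range n).foldl (pvA_rowStep g C) (List.replicate (R + C - 1) "")).getD e "" =
      String.ofList ((List.range n).flatMap
        (fun i => if e ≤ C - 1 + i ∧ C - 1 + i - e < C then pvCell g i (C - 1 + i - e) else [])) := by
  intro n
  induction n with
  | zero =>
    intro _
    rw [List.range_zero, List.foldl_nil, List.flatMap_nil]
    simp only [List.getD_eq_getElem?_getD, List.getElem?_replicate]
    split <;> simp
  | succ n ih =>
    intro hn
    rw [List.range_succ, List.foldl_append, List.foldl_cons, List.foldl_nil]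
    rw [pvA_rowStep_getD g C _ n e
      (by rw [pvA_rowFold_length, List.length_replicate]; omega)]
    rw [ih (by omega), List.flatMap_append, List.flatMap_cons,
      List.flatMap_nil, List.append_nil]
    simp

theorem pvA_getD (g : List String) (C R e : Nat) (hR : R = g.length)
    (hC : C = (PySem.Str.strip (g.headD "")).length) :
    (diagonal_to_horizontal_top_right g).getD e "" =
      String.ofList ((List.range R).flatMap
        (fun i => if e ≤ C - 1 + i ∧ C - 1 + i - e < C then pvCell g i (C - 1 + i - e) else [])) := by
  unfold diagonal_to_horizontal_top_right
  rw [← hR, ← hC]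
  exact pvA_getD_aux g C R e hR R le_rfl

theorem pvDiag (g : List String) (R C e i0 j0 : Nat) (he : e < R + C - 1)
    (hij : if C - 1 ≤ e then i0 = e - (C - 1) ∧ j0 = 0 else i0 = 0 ∧ j0 = C - 1 - e) :
    (List.range R).flatMap
        (fun i => if e ≤ C - 1 + i ∧ C - 1 + i - e < C then pvCell g i (C - 1 + i - e) else [])
      = (List.range (R - i0)).flatMap
        (fun t => if j0 + t < C then pvCell g (i0 + t) (j0 + t) else []) := by
  have hkey : C - 1 + i0 = e + j0 ∧ i0 ≤ R ∧ ∀ i, i < i0 → C - 1 + i < e := by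
    by_cases hce : C - 1 ≤ e
    · rw [if_pos hce] at hij
      obtain ⟨ha, hb⟩ := hij
      exact ⟨by omega, by omega, fun i hi => by omega⟩
    · rw [if_neg hce] at hij
      obtain ⟨ha, hb⟩ := hij
      exact ⟨by omega, by omega, fun i hi => by omega⟩
  obtain ⟨hk1, hk2, hk3⟩ := hkey
  conv_lhs => rw [show R = i0 + (R - i0) by omega]
  rw [List.range_add, List.flatMap_append]
  have h1 : (List.range i0).flatMap
      (fun i => if e ≤ C - 1 + i ∧ C - 1 + i - e < C then pvCell g i (C - 1 + i - e) else [])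
      = [] := by
    rw [List.flatMap_eq_nil_iff]
    intro i hi
    have hm := List.mem_range.mp hi
    have := hk3 i hm
    rw [if_neg (by omega)]
  rw [h1, List.nil_append, List.flatMap_map]
  have hfun : ∀ t, (if e ≤ C - 1 + (i0 + t) ∧ C - 1 + (i0 + t) - e < C
        then pvCell g (i0 + t) (C - 1 + (i0 + t) - e) else [])
      = (if j0 + t < C then pvCell g (i0 + t) (j0 + t) else []) := by
    intro t
    have harg : C - 1 + (i0 + t) - e = j0 + t := by omega
    have hcond : (e ≤ C - 1 + (i0 + t) ∧ j0 + t < C) ↔ (j0 + t < C) := by omega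
    rw [harg]
    exact if_congr hcond rfl rfl
  exact congrArg (fun f => List.flatMap f (List.range (R - i0))) (funext hfun)

-- ===== VERDICT (by name: the statement is the Claim_ definition above) =====
theorem diagonal_to_horizontal_top_right_spec : Claim_equal_diagonal_to_horizontal_top_right := by
  intro g _dom _pre
  unfold Spec_diagonal_to_horizontal_top_right
  apply List.ext_getElem
  · rw [pvA_length]
    unfold diagonal_to_horizontal_top_right_alt
    dsimp only
    simp
  · intro e h1 h2
    have he : e < g.length + (PySem.Str.strip (g.headD "")).length - 1 := by
      rw [pvA_length] at h1; exact h1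
    rw [← List.getD_eq_getElem (diagonal_to_horizontal_top_right g) "" h1]
    rw [pvA_getD g ((PySem.Str.strip (g.headD "")).length) g.length e rfl rfl]
    unfold diagonal_to_horizontal_top_right_alt
    dsimp only
    simp only [List.getElem_map, List.getElem_range]
    obtain ⟨C, hC⟩ : ∃ C, (PySem.Str.strip (g.headD "")).length = C := ⟨_, rfl⟩
    rw [hC] at he ⊢
    cases C with
    | zero =>
      have hL : (List.range g.length).flatMap
          (fun i => if e ≤ 0 - 1 + i ∧ 0 - 1 + i - e < 0 then pvCell g i (0 - 1 + i - e) else [])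
          = [] := List.flatMap_eq_nil_iff.mpr (fun i _ => if_neg (by omega))
      rw [hL, if_pos (show (0 : Int) ≤ (e : Int) - (((0 : Nat) : Int) - 1) by omega)]
      dsimp only
      rw [pvWalk_eq g g.length 0 (g.length - ((e : Int) - (((0 : Nat) : Int) - 1)).toNat)
        (((e : Int) - (((0 : Nat) : Int) - 1)).toNat) 0 rfl]
      rw [List.flatMap_eq_nil_iff.mpr (fun t _ => if_neg (by omega))]
    | succ m =>
      by_cases hce : m ≤ e
      · have h0k : (0 : Int) ≤ (e : Int) - (((m + 1 : Nat) : Int) - 1) := by push_cast; omega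
        rw [if_pos h0k]
        dsimp only
        have ht : ((e : Int) - (((m + 1 : Nat) : Int) - 1)).toNat = e - m := by push_cast; omega
        rw [ht]
        rw [pvWalk_eq g g.length (m + 1) (g.length - (e - m)) (e - m) 0 rfl]
        exact congrArg String.ofList
          (pvDiag g g.length (m + 1) e (e - m) 0 he (by rw [if_pos (by omega)]; exact ⟨by omega, rfl⟩))
      · have h0k : ¬ (0 : Int) ≤ (e : Int) - (((m + 1 : Nat) : Int) - 1) := by push_cast; omega
        rw [if_neg h0k]
        dsimp only
        have ht : (-((e : Int) - (((m + 1 : Nat) : Int) - 1))).toNat = m - e := by push_cast; omega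
        rw [ht]
        rw [pvWalk_eq g g.length (m + 1) (g.length - 0) 0 (m - e) rfl]
        exact congrArg String.ofList
          (pvDiag g g.length (m + 1) e 0 (m - e) he (by rw [if_neg (by omega)]; exact ⟨rfl, by omega⟩))
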